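-- pv_equiv track=rewrite | github.com/mach-hub-g1/ACC45DAYSOFCODE-2024 | Day32-TLG.py | find_winner_and_lead
-- ===== SOURCE A (Python) =====
-- def find_winner_and_lead(N, rounds):
--     cumulative_score_player1 = 0
--     cumulative_score_player2 = 0
--     max_lead = 0
--     winner = 0
--
--     for i in range(N):
--         score_player1, score_player2 = rounds[i]
--         cumulative_score_player1 += score_player1
--         cumulative_score_player2 += score_player2
--
--         if cumulative_score_player1 > cumulative_score_player2:
--             lead = cumulative_score_player1 - cumulative_score_player2
--             if lead > max_lead:
--                 max_lead = lead
--                 winner = 1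
--         else:
--             lead = cumulative_score_player2 - cumulative_score_player1
--             if lead > max_lead:
--                 max_lead = lead
--                 winner = 2
--
--     return winner, max_lead
-- ===== SOURCE B (Python) =====
-- def find_winner_and_lead(N, rounds):
--     # Pass 1: build the running score differences (player1 - player2).
--     diffs = []
--     d = 0
--     for i in range(N):
--         p1, p2 = rounds[i]
--         d += p1 - p2
--         diffs.append(d)
--     # Pass 2: max-scan over the running differences.
--     winner, max_lead = 0, 0
--     for d in diffs:
--         lead = d if d > 0 else -d
--         if lead > max_lead:
--             max_lead, winner = lead, (1 if d > 0 else 2)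
--     return winner, max_lead
-- ===== Notes on version B (the rewrite author's own statement) =====
-- stated objective: alternative
-- what changed: Replaced the single loop over four state variables (two cumulative scores, max lead, winner) by a two-pass decomposition: first build the list of running score differences, then an independent max-scan over those differences tracking only (winner, max_lead).
import Mathlib
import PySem

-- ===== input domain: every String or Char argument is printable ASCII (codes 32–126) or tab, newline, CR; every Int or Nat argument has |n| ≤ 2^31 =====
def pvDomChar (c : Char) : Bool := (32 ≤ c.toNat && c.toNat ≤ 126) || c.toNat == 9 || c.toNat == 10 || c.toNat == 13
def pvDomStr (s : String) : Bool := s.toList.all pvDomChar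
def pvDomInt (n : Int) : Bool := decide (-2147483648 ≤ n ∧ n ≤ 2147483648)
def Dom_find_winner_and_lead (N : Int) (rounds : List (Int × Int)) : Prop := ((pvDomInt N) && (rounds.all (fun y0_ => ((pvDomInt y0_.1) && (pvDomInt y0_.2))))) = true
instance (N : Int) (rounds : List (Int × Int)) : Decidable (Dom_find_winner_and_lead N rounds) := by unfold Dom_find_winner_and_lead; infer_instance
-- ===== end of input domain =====

-- B replaces A's single four-variable loop by a two-pass decomposition (build running
-- score differences, then a separate max-scan over them); objective: alternative.


-- ===== PORT A =====
def fwlStepA (rounds : List (Int × Int)) (st : Int × Int × Int × Int) (i : Int) : Int × Int × Int × Int :=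
  let p := (PySem.List.pyGet? rounds i).getD (0, 0)
  let c1 := st.1 + p.1
  let c2 := st.2.1 + p.2
  if c1 > c2 then
    let lead := c1 - c2
    if lead > st.2.2.1 then (c1, c2, lead, 1) else (c1, c2, st.2.2.1, st.2.2.2)
  else
    let lead := c2 - c1
    if lead > st.2.2.1 then (c1, c2, lead, 2) else (c1, c2, st.2.2.1, st.2.2.2)

def find_winner_and_lead (N : Int) (rounds : List (Int × Int)) : Int × Int :=
  let st := (PySem.List.pyRange 0 N 1).foldl (fwlStepA rounds) (0, 0, 0, 0)
  (st.2.2.2, st.2.2.1)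

-- ===== PORT B =====
-- Pass 1 of Source B: running differences, accumulated with a foldl appending to a list.
def fwlDiffs (N : Int) (rounds : List (Int × Int)) : List Int :=
  ((PySem.List.pyRange 0 N 1).foldl (fun (st : Int × List Int) i =>
    let p := (PySem.List.pyGet? rounds i).getD (0, 0)
    let d := st.1 + (p.1 - p.2)
    (d, st.2 ++ [d])) (0, [])).2

-- Pass 2 of Source B: max-scan over the running differences.
def fwlStepB (st : Int × Int) (d : Int) : Int × Int :=
  let lead := if d > 0 then d else -d
  if lead > st.2 then ((if d > 0 then (1 : Int) else 2), lead) else st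

def find_winner_and_lead_alt (N : Int) (rounds : List (Int × Int)) : Int × Int :=
  (fwlDiffs N rounds).foldl fwlStepB (0, 0)

-- ===== PRECONDITION & SPEC =====
-- Pre_ excludes exactly the inputs where Python A raises (IndexError: rounds[i] with i ≥ len(rounds)).
def Pre_find_winner_and_lead (N : Int) (rounds : List (Int × Int)) : Prop := N ≤ rounds.length
instance (N : Int) (rounds : List (Int × Int)) : Decidable (Pre_find_winner_and_lead N rounds) := by unfold Pre_find_winner_and_lead; infer_instance
def pvWitness_find_winner_and_lead : Int × (List (Int × Int)) := (3, [(1, 0), (0, 5), (2, 2)])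

def Spec_find_winner_and_lead (N : Int) (rounds : List (Int × Int)) (out : Int × Int) : Prop := out = find_winner_and_lead_alt N rounds
instance (N : Int) (rounds : List (Int × Int)) (out : Int × Int) : Decidable (Spec_find_winner_and_lead N rounds out) := by unfold Spec_find_winner_and_lead; infer_instance

-- ===== CLAIM (what is proved, stated in full; the proofs are below) =====
def Claim_equal_find_winner_and_lead : Prop := ∀ (N : Int) (rounds : List (Int × Int)), Dom_find_winner_and_lead N rounds → Pre_find_winner_and_lead N rounds → Spec_find_winner_and_lead N rounds (find_winner_and_lead N rounds)

-- ===== LEMMAS AND PROOFS =====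

-- The running differences produced by iterating the index list L from accumulated difference d.
def fwlDiffsFrom (rounds : List (Int × Int)) (d : Int) : List Int → List Int
  | [] => []
  | i :: L =>
    let p := (PySem.List.pyGet? rounds i).getD (0, 0)
    let d' := d + (p.1 - p.2)
    d' :: fwlDiffsFrom rounds d' L

theorem fwlDiffs_fold (rounds : List (Int × Int)) :
    ∀ (L : List Int) (d : Int) (acc : List Int),
      (L.foldl (fun (st : Int × List Int) i =>
        let p := (PySem.List.pyGet? rounds i).getD (0, 0)
        let d := st.1 + (p.1 - p.2)
        (d, st.2 ++ [d])) (d, acc)).2 = acc ++ fwlDiffsFrom rounds d L := by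
  intro L
  induction L with
  | nil => intro d acc; simp [fwlDiffsFrom]
  | cons i L ih =>
      intro d acc
      simp only [List.foldl_cons, fwlDiffsFrom]
      rw [ih]
      simp

theorem fwl_main (rounds : List (Int × Int)) :
    ∀ (L : List Int) (c1 c2 m w : Int), 0 ≤ m →
      (((L.foldl (fwlStepA rounds) (c1, c2, m, w)).2.2.2,
        (L.foldl (fwlStepA rounds) (c1, c2, m, w)).2.2.1) : Int × Int)
        = (fwlDiffsFrom rounds (c1 - c2) L).foldl fwlStepB (w, m) := by
  intro L
  induction L with
  | nil => intro c1 c2 m w _; simp [fwlDiffsFrom]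
  | cons i L ih =>
      intro c1 c2 m w hm
      simp only [List.foldl_cons, fwlDiffsFrom, fwlStepA, fwlStepB]
      generalize (PySem.List.pyGet? rounds i).getD (0, 0) = p
      obtain ⟨p1, p2⟩ := p
      simp only
      have hD : c1 - c2 + (p1 - p2) = c1 + p1 - (c2 + p2) := by ring
      by_cases h1 : m < c1 + p1 - (c2 + p2)
      · have hgt : c1 + p1 > c2 + p2 := by omega
        have hpos : c1 - c2 + (p1 - p2) > 0 := by omega
        rw [if_pos hgt, if_pos h1, if_pos hpos, if_pos (by omega : c1 - c2 + (p1 - p2) > m)]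
        rw [ih _ _ _ _ (by omega)]
        rw [hD, if_pos (by omega : c1 + p1 - (c2 + p2) > 0)]
      · by_cases h2 : m < (c2 + p2) - (c1 + p1)
        · have hle : ¬ (c1 + p1 > c2 + p2) := by omega
          have hnp : ¬ (c1 - c2 + (p1 - p2) > 0) := by omega
          rw [if_neg hle, if_pos h2, if_neg hnp,
            if_pos (by omega : -(c1 - c2 + (p1 - p2)) > m)]
          rw [ih _ _ _ _ (by omega)]
          rw [hD]
          have : -(c1 + p1 - (c2 + p2)) = c2 + p2 - (c1 + p1) := by ring
          rw [this, if_neg (by omega : ¬ (c1 + p1 - (c2 + p2) > 0))]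
        · by_cases hgt : c1 + p1 > c2 + p2
          · have hpos : c1 - c2 + (p1 - p2) > 0 := by omega
            rw [if_pos hgt, if_neg h1, if_pos hpos,
              if_neg (by omega : ¬ (c1 - c2 + (p1 - p2) > m))]
            rw [ih _ _ _ _ hm, hD]
          · have hnp : ¬ (c1 - c2 + (p1 - p2) > 0) := by omega
            rw [if_neg hgt, if_neg h2, if_neg hnp,
              if_neg (by omega : ¬ (-(c1 - c2 + (p1 - p2)) > m))]
            rw [ih _ _ _ _ hm, hD]

-- ===== VERDICT (by name: the statement is the Claim_ definition above) =====
theorem find_winner_and_lead_spec : Claim_equal_find_winner_and_lead := by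
  intro N rounds _ _
  unfold Spec_find_winner_and_lead find_winner_and_lead find_winner_and_lead_alt fwlDiffs
  rw [fwlDiffs_fold]
  have h := fwl_main rounds (PySem.List.pyRange 0 N 1) 0 0 0 0 (le_refl 0)
  simpa using h
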